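-- pv_equiv track=rewrite | github.com/li-yanhao/ird | src/misc.py | group_close_value
-- ===== SOURCE A (Python) =====
-- import copy
--
-- def group_close_value(l:list, eps=2) -> list:
--     if len(l) == 0: return []
--     l_final = []
--     d_cluster = [copy.deepcopy(l[0])]
--     idx = 1
--     while idx < len(l):
--         if l[idx] - d_cluster[-1] > eps:
--             # take the median, and clear the cluster
--             l_final.append(copy.deepcopy(d_cluster[len(d_cluster) // 2]))
--             d_cluster = []
--         d_cluster.append(copy.deepcopy(l[idx]))
--         idx += 1
--     l_final.append(d_cluster[len(d_cluster) // 2])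
--
--     return l_final
-- ===== SOURCE B (Python) =====
-- import copy
--
-- def group_close_value(l:list, eps=2) -> list:
--     # Index-based algorithm: no cluster lists are ever built.
--     # Pass 1: compute the cut positions (indices where the gap to the
--     # previous element exceeds eps), giving the boundary list.
--     n = len(l)
--     if n == 0:
--         return []
--     cuts = [i for i in range(1, n) if l[i] - l[i-1] > eps]
--     bounds = [0] + cuts + [n]
--     # Pass 2: each consecutive boundary pair (s, e) delimits one cluster
--     # l[s:e]; its median element sits at index s + (e - s) // 2.
--     return [copy.deepcopy(l[s + (e - s) // 2]) for s, e in zip(bounds, bounds[1:])]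
-- ===== Notes on version B (the rewrite author's own statement) =====
-- stated objective: alternative
-- what changed: B never materialises cluster lists: it first computes the cut indices (where the gap between consecutive elements exceeds eps) in one pass, then reads each cluster's median directly from l by index arithmetic s + (e - s)//2 over consecutive boundary pairs, whereas A maintains and flushes a running cluster list inside one loop.
import Mathlib
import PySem

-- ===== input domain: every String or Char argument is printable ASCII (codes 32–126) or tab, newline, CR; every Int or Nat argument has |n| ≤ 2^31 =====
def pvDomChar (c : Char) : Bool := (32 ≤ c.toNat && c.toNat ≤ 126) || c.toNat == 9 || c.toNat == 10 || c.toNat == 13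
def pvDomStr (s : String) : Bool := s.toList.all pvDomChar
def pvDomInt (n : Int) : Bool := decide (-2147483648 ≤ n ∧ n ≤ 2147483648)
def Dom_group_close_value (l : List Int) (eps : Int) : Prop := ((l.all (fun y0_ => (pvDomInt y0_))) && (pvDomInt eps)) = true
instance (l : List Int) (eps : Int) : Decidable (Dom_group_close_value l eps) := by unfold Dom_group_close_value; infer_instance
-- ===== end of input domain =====

-- B computes cut indices and reads each cluster median directly by index arithmetic,
-- instead of A's loop that materialises and flushes a running cluster list (objective: alternative).


-- ===== PORT A =====
-- A's while-loop: state is (remaining input, current cluster d_cluster, output l_final);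
-- the cluster is nonempty at every median/last access, so getD's default 0 is never used.
def gcvLoopA (rest : List Int) (cluster : List Int) (acc : List Int) (eps : Int) : List Int :=
  match rest with
  | [] => acc ++ [cluster.getD (cluster.length / 2) 0]
  | y :: ys =>
    if y - cluster.getLastD 0 > eps then
      gcvLoopA ys [y] (acc ++ [cluster.getD (cluster.length / 2) 0]) eps
    else
      gcvLoopA ys (cluster ++ [y]) acc eps

def group_close_value (l : List Int) (eps : Int) : List Int :=
  match l with
  | [] => []
  | x :: rest => gcvLoopA rest [x] [] eps

-- ===== PORT B =====
-- Indices produced by range(1, n) are nonnegative, so they are ported as Nat and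
-- l[i] as l.getD i 0 (exact: every index read lies in range).
def group_close_value_alt (l : List Int) (eps : Int) : List Int :=
  let n := l.length
  if n = 0 then []
  else
    -- Pass 1: cut positions, then the boundary list.
    let cuts := (List.range' 1 (n - 1)).filter (fun i => l.getD i 0 - l.getD (i - 1) 0 > eps)
    let bounds := 0 :: (cuts ++ [n])
    -- Pass 2: each boundary pair (s, e) delimits cluster l[s:e]; median at s + (e-s)/2.
    (bounds.zip bounds.tail).map (fun p => l.getD (p.1 + (p.2 - p.1) / 2) 0)

-- ===== PRECONDITION & SPEC =====
def Spec_group_close_value (l : List Int) (eps : Int) (out : List Int) : Prop := out = group_close_value_alt l eps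
instance (l : List Int) (eps : Int) (out : List Int) : Decidable (Spec_group_close_value l eps out) := by unfold Spec_group_close_value; infer_instance

-- ===== CLAIM (what is proved, stated in full; the proofs are below) =====
def Claim_equal_group_close_value : Prop := ∀ (l : List Int) (eps : Int), Dom_group_close_value l eps → Spec_group_close_value l eps (group_close_value l eps)

-- ===== LEMMAS AND PROOFS =====

-- Cut positions from index i onward (proof helper; for i = 1 it is B's `cuts`).
def cutsFrom (L : List Int) (eps : Int) (i : Nat) : List Nat :=
  (List.range' i (L.length - i)).filter (fun j => L.getD j 0 - L.getD (j - 1) 0 > eps)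

theorem getD_drop_take (L : List Int) (s k m : Nat) (hm : m < k) :
    ((L.drop s).take k).getD m 0 = L.getD (s + m) 0 := by
  simp [List.getD, List.getElem?_drop, hm]

theorem getLastD_drop_take (L : List Int) (s i : Nat) (hs : s < i) (hi : i ≤ L.length) :
    ((L.drop s).take (i - s)).getLastD 0 = L.getD (i - 1) 0 := by
  have hlen : ((L.drop s).take (i - s)).length = i - s := by
    simp [List.length_take, List.length_drop]; omega
  rw [List.getLastD_eq_getLast?, List.getLast?_eq_getElem?, hlen,
    List.getElem?_take_of_lt (by omega), List.getElem?_drop]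
  rw [show s + (i - s - 1) = i - 1 by omega]
  rfl

theorem cutsFrom_succ (L : List Int) (eps : Int) (i : Nat) (hi : i < L.length) :
    cutsFrom L eps i =
      if L.getD i 0 - L.getD (i - 1) 0 > eps then i :: cutsFrom L eps (i + 1)
      else cutsFrom L eps (i + 1) := by
  unfold cutsFrom
  have h : L.length - i = (L.length - (i + 1)) + 1 := by omega
  rw [h, List.range'_succ, List.filter_cons]
  by_cases hcut : L.getD i 0 - L.getD (i - 1) 0 > eps
  · simp
  · simp

theorem zip_append_right (xs zs : List Nat) (y : Nat) (h : zs.length ≤ xs.length) :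
    (xs ++ [y]).zip zs = xs.zip zs := by
  induction xs generalizing zs with
  | nil =>
    cases zs with
    | nil => simp
    | cons z zs => simp at h
  | cons x xs ih =>
    cases zs with
    | nil => simp
    | cons z zs => simp only [List.cons_append, List.zip_cons_cons, ih zs (by simpa using h)]

-- Main invariant: A's loop on the suffix L.drop i, with running cluster L[s:i],
-- produces acc followed by the medians read off the boundary pairs starting at s.
theorem loopA_bounds (L : List Int) (eps : Int) :
    ∀ (k s i : Nat) (acc : List Int), L.length - i = k → s < i → i ≤ L.length →
    gcvLoopA (L.drop i) ((L.drop s).take (i - s)) acc eps =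
      acc ++ (((s :: cutsFrom L eps i).zip (cutsFrom L eps i ++ [L.length])).map
        (fun p => L.getD (p.1 + (p.2 - p.1) / 2) 0)) := by
  intro k
  induction k with
  | zero =>
    intro s i acc hk hs hi
    have hin : i = L.length := by omega
    have : L.drop i = [] := by simp [hin]
    rw [this]
    have hcf : cutsFrom L eps i = [] := by unfold cutsFrom; simp [hin]
    simp only [gcvLoopA, hcf, List.nil_append, List.zip_cons_cons, List.zip_nil_right,
      List.map_cons, List.map_nil]
    rw [show ((L.drop s).take (i - s)).length = i - s by
      simp [List.length_take, List.length_drop]; omega]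
    rw [getD_drop_take L s (i - s) ((i - s) / 2) (Nat.div_lt_self (by omega) (by omega))]
    simp [hin]
  | succ k ih =>
    intro s i acc hk hs hi
    have hilt : i < L.length := by omega
    rw [List.drop_eq_getElem_cons hilt]
    have hgetD : L[i] = L.getD i 0 := by simp [List.getD, List.getElem?_eq_getElem hilt]
    simp only [gcvLoopA, getLastD_drop_take L s i hs hi, hgetD,
      cutsFrom_succ L eps i hilt]
    split_ifs with hcut
    · -- cut at i: flush the median of L[s:i], restart cluster at i
      have h1 : [L.getD i 0] = (L.drop i).take ((i + 1) - i) := by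
        rw [show (i + 1) - i = 1 by omega]
        rw [List.take_one, List.drop_eq_getElem_cons hilt]
        simp [hgetD]
      rw [h1, ih i (i + 1) _ (by omega) (by omega) (by omega)]
      rw [show ((L.drop s).take (i - s)).length = i - s by
        simp [List.length_take, List.length_drop]; omega]
      rw [getD_drop_take L s (i - s) ((i - s) / 2) (Nat.div_lt_self (by omega) (by omega))]
      simp [List.zip_cons_cons]
    · -- no cut: extend the cluster to L[s:i+1]
      have h2 : (L.drop s).take (i - s) ++ [L.getD i 0] = (L.drop s).take ((i + 1) - s) := by
        rw [show (i + 1) - s = (i - s) + 1 by omega, List.take_add_one]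
        have : (L.drop s)[i - s]? = some L[i] := by
          rw [List.getElem?_drop]
          rw [show s + (i - s) = i by omega, List.getElem?_eq_getElem hilt]
        simp [this, hgetD]
      rw [h2, ih s (i + 1) acc (by omega) (by omega) (by omega)]

-- ===== VERDICT (by name: the statement is the Claim_ definition above) =====
theorem group_close_value_spec : Claim_equal_group_close_value := by
  intro l eps _
  unfold Spec_group_close_value
  cases l with
  | nil => rfl
  | cons x rest =>
    show gcvLoopA rest [x] [] eps = group_close_value_alt (x :: rest) eps
    have hA := loopA_bounds (x :: rest) eps rest.length 0 1 [] (by simp) (by omega) (by simp)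
    simp only [show (x :: rest).drop 1 = rest from rfl,
      show ((x :: rest).drop 0).take (1 - 0) = [x] from rfl, List.nil_append] at hA
    rw [hA]
    unfold group_close_value_alt
    simp only [cutsFrom, List.length_cons, Nat.add_sub_cancel, List.tail_cons,
      List.cons_append, List.nil_append, Nat.succ_ne_zero, if_false]
    exact congrArg _ (zip_append_right
      (0 :: (List.range' 1 rest.length).filter
        (fun i => (x :: rest).getD i 0 - (x :: rest).getD (i - 1) 0 > eps))
      ((List.range' 1 rest.length).filter
        (fun i => (x :: rest).getD i 0 - (x :: rest).getD (i - 1) 0 > eps) ++ [rest.length + 1])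
      (rest.length + 1) (by simp)).symm
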